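-- pv_equiv track=rewrite | github.com/EWBSWE/MemberStats | MemberStats/MemberStatisticsCalc.py | get_gender_dist
-- ===== SOURCE A (Python) =====
-- def get_gender_dist(members):
--
--     nbr_male = 0
--     nbr_female = 0
--     nbr_unknown = 0
--
--     for member in members:
--         if member['gender'] == 'male':
--             nbr_male += 1
--         elif member['gender'] == 'female':
--             nbr_female += 1
--         else:
--             nbr_unknown += 1
--
--     return {'male': nbr_male, 'female': nbr_female, 'unknown': nbr_unknown}
-- ===== SOURCE B (Python) =====
-- def get_gender_dist(members):
--     # Staged passes: project out the gender column once, then count each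
--     # bucket with list.count; 'unknown' is whatever remains of the total.
--     genders = [m['gender'] for m in members]
--     male = genders.count('male')
--     female = genders.count('female')
--     return {'male': male, 'female': female,
--             'unknown': len(genders) - male - female}
-- ===== Notes on version B (the rewrite author's own statement) =====
-- stated objective: simpler
-- what changed: B replaces A's single classification loop with three explicit counters by a projection of the gender column followed by staged list.count passes, deriving 'unknown' by subtraction from the total.
import Mathlib
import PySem

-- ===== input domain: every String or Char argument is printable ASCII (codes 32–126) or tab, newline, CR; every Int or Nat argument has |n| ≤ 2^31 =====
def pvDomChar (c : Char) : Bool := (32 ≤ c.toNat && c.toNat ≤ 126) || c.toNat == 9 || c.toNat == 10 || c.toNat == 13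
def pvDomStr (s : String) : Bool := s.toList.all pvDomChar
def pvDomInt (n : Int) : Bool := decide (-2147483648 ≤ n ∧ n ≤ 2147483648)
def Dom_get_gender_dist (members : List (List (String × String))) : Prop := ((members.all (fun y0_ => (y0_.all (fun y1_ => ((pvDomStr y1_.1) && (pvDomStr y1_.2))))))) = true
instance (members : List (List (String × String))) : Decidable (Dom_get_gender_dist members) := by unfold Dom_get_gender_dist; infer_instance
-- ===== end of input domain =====

-- B replaces the classification loop by a gender-column projection and staged count passes;
-- equivalence is about the return value.

-- ===== PORT A =====
-- member['gender'] : KeyError when the key is absent → excluded by Pre_; the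
-- default "" here is never reached under Pre_get_gender_dist.
def aStep (acc : Int × Int × Int) (g : String) : Int × Int × Int :=
  if g == "male" then (acc.1 + 1, acc.2.1, acc.2.2)
  else if g == "female" then (acc.1, acc.2.1 + 1, acc.2.2)
  else (acc.1, acc.2.1, acc.2.2 + 1)
def get_gender_dist (members : List (List (String × String))) : List (String × Int) :=
  let st := members.foldl (fun acc member =>
      aStep acc ((PySem.Dict.mk member).getD "gender" "")) (0, 0, 0)
  [("male", st.1), ("female", st.2.1), ("unknown", st.2.2)]

-- ===== PORT B =====
def get_gender_dist_alt (members : List (List (String × String))) : List (String × Int) :=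
  let genders := members.map (fun m => (PySem.Dict.mk m).getD "gender" "")
  let male : Int := PySem.List.count genders "male"
  let female : Int := PySem.List.count genders "female"
  [("male", male), ("female", female), ("unknown", (genders.length : Int) - male - female)]

-- ===== PRECONDITION & SPEC =====
-- Pre_ excludes exactly the members without a 'gender' key, on which the Python A raises KeyError.
def Pre_get_gender_dist (members : List (List (String × String))) : Prop :=
  (members.all (fun member => (PySem.Dict.mk member).contains "gender")) = true
instance (members : List (List (String × String))) : Decidable (Pre_get_gender_dist members) := by unfold Pre_get_gender_dist; infer_instance
def pvWitness_get_gender_dist : (List (List (String × String))) :=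
  [[("gender", "male")], [("gender", "other"), ("name", "x")], [("gender", "female")]]
def Spec_get_gender_dist (members : List (List (String × String))) (out : List (String × Int)) : Prop := out = get_gender_dist_alt members
instance (members : List (List (String × String))) (out : List (String × Int)) : Decidable (Spec_get_gender_dist members out) := by unfold Spec_get_gender_dist; infer_instance

-- ===== CLAIM (what is proved, stated in full; the proofs are below) =====
def Claim_equal_get_gender_dist : Prop := ∀ (members : List (List (String × String))), Dom_get_gender_dist members → Pre_get_gender_dist members → Spec_get_gender_dist members (get_gender_dist members)

-- ===== LEMMAS AND PROOFS =====

-- A's loop, characterised: running totals plus the counts over the gender list.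
lemma a_fold_eq (gs : List String) (a b c : Int) :
    gs.foldl aStep (a, b, c)
    = (a + gs.count "male", b + gs.count "female",
       c + ((gs.length : Int) - gs.count "male" - gs.count "female")) := by
  induction gs generalizing a b c with
  | nil => simp
  | cons g t ih =>
    rw [List.foldl_cons]
    by_cases hm : g = "male"
    · have hs : aStep (a, b, c) g = (a + 1, b, c) := by simp [aStep, hm]
      rw [hs, ih]
      subst hm
      simp only [Prod.ext_iff, List.count_cons]
      norm_num
      omega
    · by_cases hf : g = "female"
      · have hs : aStep (a, b, c) g = (a, b + 1, c) := by simp [aStep, hf]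
        rw [hs, ih]
        subst hf
        simp only [Prod.ext_iff, List.count_cons]
        norm_num [hm]
        omega
      · have hs : aStep (a, b, c) g = (a, b, c + 1) := by simp [aStep, hm, hf]
        rw [hs, ih]
        simp only [Prod.ext_iff, List.count_cons]
        norm_num [hm, hf]
        omega

-- ===== VERDICT (by name: the statement is the Claim_ definition above) =====
theorem get_gender_dist_spec : Claim_equal_get_gender_dist := by
  intro members _ _
  unfold Spec_get_gender_dist get_gender_dist get_gender_dist_alt
  rw [show (fun acc member => aStep acc ((PySem.Dict.mk member).getD "gender" ""))
      = (fun acc m => aStep acc ((fun member => (PySem.Dict.mk member).getD "gender" "") m)) from rfl,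
    ← List.foldl_map, a_fold_eq]
  simp [PySem.List.count_eq]
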